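-- pv_equiv track=rewrite | github.com/Symbolk/AlgInPy | search/1162as-far-from-land-as-possible.py | maxDistance4
-- ===== SOURCE A (Python) =====
-- from typing import List
--
-- def maxDistance4(grid: List[List[int]]) -> int:
--     n = len(grid)
--     d, inQueue = [[float('inf')] * n for _ in range(n)], [[False] * n for _ in range(n)]
--     queue = []
--     directions = [(-1, 0), (1, 0), (0, -1), (0, 1)]
--
--     def isValid(x, y):
--         if x < 0 or x >= n or y < 0 or y >= n: return False
--         return True
--
--     for i in range(n):
--         for j in range(n):
--             if grid[i][j]:  # ->island
--                 d[i][j] = 0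
--                 queue.append([i, j])
--                 inQueue[i][j] = True
--
--     while queue:
--         x, y = queue.pop(0)
--         for dx, dy in directions:
--             next_x, next_y = x + dx, y + dy
--             if isValid(next_x, next_y) and d[next_x][next_y] > d[x][y] + 1:
--                 d[next_x][next_y] = d[x][y] + 1
--                 if not inQueue[next_x][next_y]:
--                     queue.append([next_x, next_y])
--                     inQueue[next_x][next_y] = True
--
--     ans = -1
--     for i in range(n):
--         for j in range(n):
--             if grid[i][j] == 0: ans = max(ans, d[i][j])
--
--     return ans if ans != float('inf') else -1
-- ===== SOURCE B (Python) =====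
-- from typing import List
--
-- def maxDistance4(grid: List[List[int]]) -> int:
--     # Brute force: answer = max over water cells of the Manhattan distance to
--     # the nearest land cell (-1 if no land or no water).
--     n = len(grid)
--     land = [(i, j) for i in range(n) for j in range(n) if grid[i][j]]
--     if not land:
--         return -1
--     best = -1
--     for i in range(n):
--         for j in range(n):
--             if grid[i][j] == 0:
--                 best = max(best, min(abs(i - a) + abs(j - b) for a, b in land))
--     return best
-- ===== Notes on version B (the rewrite author's own statement) =====
-- stated objective: simpler
-- what changed: Replaces the multi-source BFS (distance grid, FIFO queue, inQueue flags) by a direct brute-force maximum over water cells of the minimum Manhattan distance to any land cell, which is what the unobstructed BFS computes.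
import Mathlib
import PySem

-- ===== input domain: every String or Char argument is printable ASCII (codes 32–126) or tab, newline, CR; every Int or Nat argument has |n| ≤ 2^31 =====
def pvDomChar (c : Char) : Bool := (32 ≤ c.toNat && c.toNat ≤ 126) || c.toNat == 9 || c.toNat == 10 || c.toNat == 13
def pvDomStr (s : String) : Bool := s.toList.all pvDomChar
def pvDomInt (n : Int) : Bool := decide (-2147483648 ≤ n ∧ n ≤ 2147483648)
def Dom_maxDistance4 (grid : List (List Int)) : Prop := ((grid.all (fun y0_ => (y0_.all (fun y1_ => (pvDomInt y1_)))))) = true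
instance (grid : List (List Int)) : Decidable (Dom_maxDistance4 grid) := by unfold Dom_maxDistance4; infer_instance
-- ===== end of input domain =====

-- B replaces the multi-source BFS by a direct max-over-water of the minimum
-- Manhattan distance to a land cell (the grid is unobstructed, so BFS distance
-- equals Manhattan distance); objective: simpler.

-- ===== PORT A =====
-- Python's float('inf') is used by A only as a value larger than any attainable
-- distance + 1; 2*n*n is such a value, and A's final comparison 'ans != inf'
-- is ported as a comparison with this sentinel.
def pvInf (n : Nat) : Int := 2 * ((n : Int) * (n : Int))

-- d[x][y] read/write (indices are Python ints, only ever used at 0 ≤ x,y < n)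
def pvGet2 (g : List (List Int)) (x y : Int) : Int := (g.getD x.toNat []).getD y.toNat 0
def pvSet2 (g : List (List Int)) (x y : Int) (v : Int) : List (List Int) :=
  g.modify x.toNat (fun r => r.set y.toNat v)
def pvGetB (g : List (List Bool)) (x y : Int) : Bool := (g.getD x.toNat []).getD y.toNat true
def pvSetB (g : List (List Bool)) (x y : Int) : List (List Bool) :=
  g.modify x.toNat (fun r => r.set y.toNat true)

def pvGridVal (grid : List (List Int)) (i j : Nat) : Int := (grid.getD i []).getD j 0

def pvIsValid (n : Nat) (x y : Int) : Bool :=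
  !(decide (x < 0) || decide (x ≥ (n : Int)) || decide (y < 0) || decide (y ≥ (n : Int)))

def pvDirections : List (Int × Int) := [(-1, 0), (1, 0), (0, -1), (0, 1)]

-- initialisation loop of A: d=0, inQueue=True and queue.append([i,j]) at land cells
def pvInitStep (grid : List (List Int))
    (st : List (List Int) × List (List Bool) × List (Int × Int)) (p : Nat × Nat) :
    List (List Int) × List (List Bool) × List (Int × Int) :=
  if pvGridVal grid p.1 p.2 ≠ 0 then
    (pvSet2 st.1 (p.1 : Int) (p.2 : Int) 0, pvSetB st.2.1 (p.1 : Int) (p.2 : Int),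
     st.2.2 ++ [((p.1 : Int), (p.2 : Int))])
  else st

def pvInit (grid : List (List Int)) (n : Nat) :
    List (List Int) × List (List Bool) × List (Int × Int) :=
  ((List.range n).flatMap (fun i => (List.range n).map (fun j => (i, j)))).foldl
    (pvInitStep grid)
    (List.replicate n (List.replicate n (pvInf n)), List.replicate n (List.replicate n false), [])

-- the body of the BFS while-loop for one direction (dx,dy)
def pvRelax (n : Nat) (x y : Int)
    (st : List (List Int) × List (List Bool) × List (Int × Int)) (dir : Int × Int) :
    List (List Int) × List (List Bool) × List (Int × Int) :=
  if pvIsValid n (x + dir.1) (y + dir.2) &&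
     decide (pvGet2 st.1 (x + dir.1) (y + dir.2) > pvGet2 st.1 x y + 1) then
    if pvGetB st.2.1 (x + dir.1) (y + dir.2) then
      (pvSet2 st.1 (x + dir.1) (y + dir.2) (pvGet2 st.1 x y + 1), st.2.1, st.2.2)
    else
      (pvSet2 st.1 (x + dir.1) (y + dir.2) (pvGet2 st.1 x y + 1),
       pvSetB st.2.1 (x + dir.1) (y + dir.2),
       st.2.2 ++ [(x + dir.1, y + dir.2)])
  else st

def pvCountFalse (g : List (List Bool)) : Nat := (g.map (fun r => r.count false)).sum

-- termination helpers for the while loop (cited by pvBfs's decreasing_by)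
theorem pvCount_set_row (r : List Bool) (j : Nat) (h : r.getD j true = false) :
    (r.set j true).count false + 1 = r.count false := by
  induction r generalizing j with
  | nil => simp [List.getD] at h
  | cons a t ih =>
    cases j with
    | zero =>
      simp [List.getD] at h
      subst h
      simp
    | succ j =>
      simp only [List.getD_cons_succ] at h
      simp only [List.set_cons_succ, List.count_cons]
      have := ih j h
      omega

theorem pvCountFalse_setB (g : List (List Bool)) (x y : Int)
    (h : pvGetB g x y = false) : pvCountFalse (pvSetB g x y) + 1 = pvCountFalse g := by
  unfold pvGetB at h
  unfold pvSetB pvCountFalse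
  generalize x.toNat = i at *
  generalize y.toNat = j at *
  induction g generalizing i with
  | nil => simp [List.getD] at h
  | cons r t ih =>
    cases i with
    | zero =>
      simp only [List.getD_cons_zero] at h
      have hm : (r :: t).modify 0 (fun r => r.set j true) = (r.set j true) :: t := by simp [List.modify]
      rw [hm]
      simp only [List.map_cons, List.sum_cons]
      have := pvCount_set_row r j h
      omega
    | succ i =>
      simp only [List.getD_cons_succ] at h
      have hm : (r :: t).modify (i+1) (fun r => r.set j true) = r :: t.modify i (fun r => r.set j true) := by simp [List.modify]
      rw [hm]
      simp only [List.map_cons, List.sum_cons]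
      have := ih i h
      omega

theorem pvRelax_measure (n : Nat) (x y : Int)
    (st : List (List Int) × List (List Bool) × List (Int × Int)) (dir : Int × Int) :
    2 * pvCountFalse (pvRelax n x y st dir).2.1 + (pvRelax n x y st dir).2.2.length ≤
      2 * pvCountFalse st.2.1 + st.2.2.length := by
  unfold pvRelax
  split
  · split
    · simp
    · rename_i hq
      simp only [Bool.not_eq_true] at hq
      have := pvCountFalse_setB st.2.1 (x + dir.1) (y + dir.2) hq
      simp only [List.length_append, List.length_cons, List.length_nil]
      omega
  · simp

theorem pvRelaxFold_measure (n : Nat) (x y : Int) (dirs : List (Int × Int))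
    (st : List (List Int) × List (List Bool) × List (Int × Int)) :
    2 * pvCountFalse (dirs.foldl (pvRelax n x y) st).2.1 +
        (dirs.foldl (pvRelax n x y) st).2.2.length ≤
      2 * pvCountFalse st.2.1 + st.2.2.length := by
  induction dirs generalizing st with
  | nil => simp
  | cons dir dirs ih =>
    simp only [List.foldl_cons]
    exact le_trans (ih _) (pvRelax_measure n x y st dir)

-- the BFS while-loop of A (queue.pop(0), then the for-loop over the 4 directions)
def pvBfs (n : Nat) (d : List (List Int)) (inQ : List (List Bool))
    (queue : List (Int × Int)) : List (List Int) :=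
  match queue with
  | [] => d
  | (x, y) :: rest =>
    pvBfs n (pvDirections.foldl (pvRelax n x y) (d, inQ, rest)).1
      (pvDirections.foldl (pvRelax n x y) (d, inQ, rest)).2.1
      (pvDirections.foldl (pvRelax n x y) (d, inQ, rest)).2.2
termination_by 2 * pvCountFalse inQ + queue.length
decreasing_by
  have h := pvRelaxFold_measure n x y pvDirections (d, inQ, rest)
  simp only [List.length_cons] at h ⊢
  omega

def maxDistance4 (grid : List (List Int)) : Int :=
  let n := grid.length
  let st := pvInit grid n
  let d := pvBfs n st.1 st.2.1 st.2.2
  let ans := (List.range n).foldl (fun ans i => (List.range n).foldl (fun ans j =>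
      if pvGridVal grid i j = 0 then max ans (pvGet2 d (i : Int) (j : Int)) else ans) ans) (-1)
  if ans ≠ pvInf n then ans else -1

-- ===== PORT B =====
-- land = [(i, j) for i in range(n) for j in range(n) if grid[i][j]]
def pvLandCells (grid : List (List Int)) : List (Int × Int) :=
  (List.range grid.length).flatMap (fun i =>
    (List.range grid.length).filterMap (fun j =>
      if pvGridVal grid i j ≠ 0 then some ((i : Int), (j : Int)) else none))

-- abs(i - a) + abs(j - b), as a Nat (the value of Python's int expression)
def pvMd (c l : Int × Int) : Nat := (c.1 - l.1).natAbs + (c.2 - l.2).natAbs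

def maxDistance4_alt (grid : List (List Int)) : Int :=
  let n := grid.length
  let land := pvLandCells grid
  if land.isEmpty then -1
  else
    (List.range n).foldl (fun best i => (List.range n).foldl (fun best j =>
      if pvGridVal grid i j = 0 then
        max best ((PySem.List.min?
          (land.map (fun l => (pvMd ((i : Int), (j : Int)) l : Int))) (fun v => v)).getD 0)
      else best) best) (-1)

-- ===== PRECONDITION & SPEC =====
-- Pre_ excludes exactly the ragged grids (a row shorter than len(grid)) on which
-- the Python A raises IndexError.
def Pre_maxDistance4 (grid : List (List Int)) : Prop :=
  ∀ row ∈ grid, grid.length ≤ row.length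
instance (grid : List (List Int)) : Decidable (Pre_maxDistance4 grid) := by
  unfold Pre_maxDistance4; infer_instance

def pvWitness_maxDistance4 : List (List Int) := [[1, 0], [0, 0]]

def Spec_maxDistance4 (grid : List (List Int)) (out : Int) : Prop := out = maxDistance4_alt grid
instance (grid : List (List Int)) (out : Int) : Decidable (Spec_maxDistance4 grid out) := by
  unfold Spec_maxDistance4; infer_instance

-- ===== CLAIM (what is proved, stated in full; the proofs are below) =====
def Claim_equal_maxDistance4 : Prop := ∀ (grid : List (List Int)), Dom_maxDistance4 grid →
  Pre_maxDistance4 grid → Spec_maxDistance4 grid (maxDistance4 grid)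

-- ===== LEMMAS AND PROOFS =====

-- proof-only definitions
def pvValidC (n : Nat) (c : Int × Int) : Prop :=
  0 ≤ c.1 ∧ c.1 < (n : Int) ∧ 0 ≤ c.2 ∧ c.2 < (n : Int)

def pvShape {α : Type} (n : Nat) (g : List (List α)) : Prop :=
  g.length = n ∧ ∀ i : Nat, i < n → (g.getD i []).length = n

-- minimum Manhattan distance from c to a land cell (junk 0 if no land)
def pvD (grid : List (List Int)) (c : Int × Int) : Int :=
  (PySem.List.min? ((pvLandCells grid).map (fun l => (pvMd c l : Int))) (fun v => v)).getD 0

def pvNbrs (x y : Int) : List (Int × Int) := pvDirections.map (fun dd => (x + dd.1, y + dd.2))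

theorem pvIsValid_iff (n : Nat) (c : Int × Int) :
    pvIsValid n c.1 c.2 = true ↔ pvValidC n c := by
  simp [pvIsValid, pvValidC]; omega

-- ---- access lemmas ----
theorem pvGet2_replicate (n : Nat) (v : Int) (x y : Int) (h : x.toNat < n) (h2 : y.toNat < n) :
    pvGet2 (List.replicate n (List.replicate n v)) x y = v := by
  simp [pvGet2, List.getD, h, h2]

theorem pvGetB_replicate (n : Nat) (x y : Int) (h : x.toNat < n) (h2 : y.toNat < n) :
    pvGetB (List.replicate n (List.replicate n false)) x y = false := by
  simp [pvGetB, List.getD, h, h2]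

theorem pvGetD_modify {α : Type} (l : List (List α)) (i j : Nat) (f : List α → List α) :
    (l.modify i f).getD j [] =
      if i = j ∧ j < l.length then f (l.getD j []) else l.getD j [] := by
  rw [List.getD_eq_getElem?_getD, List.getElem?_modify]
  by_cases hj : j < l.length
  · rw [List.getElem?_eq_getElem hj]
    by_cases hij : i = j <;>
      simp [hij, hj, List.getD_eq_getElem?_getD, List.getElem?_eq_getElem hj]
  · rw [List.getElem?_eq_none (by omega)]
    rw [if_neg (by omega), List.getD_eq_getElem?_getD, List.getElem?_eq_none (by omega)]
    rfl

theorem pvGetD_set {α : Type} [Inhabited α] (r : List α) (j k : Nat) (v d : α) :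
    (r.set j v).getD k d = if j = k ∧ k < r.length then v else r.getD k d := by
  rw [List.getD_eq_getElem?_getD, List.getElem?_set]
  by_cases hjk : j = k
  · subst hjk
    by_cases hk : j < r.length <;>
      simp [hk, List.getD_eq_getElem?_getD, List.getElem?_eq_none, le_of_not_gt]
  · simp [hjk, List.getD_eq_getElem?_getD]

theorem pvShape_set2 {n : Nat} {d : List (List Int)} (hs : pvShape n d) (x y : Int) (v : Int) :
    pvShape n (pvSet2 d x y v) := by
  obtain ⟨h1, h2⟩ := hs
  refine ⟨by simpa [pvSet2] using h1, ?_⟩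
  intro i hi
  simp only [pvSet2]
  rw [pvGetD_modify]
  split
  · simpa using h2 i hi
  · exact h2 i hi

theorem pvShape_setB {n : Nat} {g : List (List Bool)} (hs : pvShape n g) (x y : Int) :
    pvShape n (pvSetB g x y) := by
  obtain ⟨h1, h2⟩ := hs
  refine ⟨by simpa [pvSetB] using h1, ?_⟩
  intro i hi
  simp only [pvSetB]
  rw [pvGetD_modify]
  split
  · simpa using h2 i hi
  · exact h2 i hi

theorem pvGet2_set2_self {n : Nat} {d : List (List Int)} (hs : pvShape n d) {c : Int × Int}
    (hc : pvValidC n c) (v : Int) : pvGet2 (pvSet2 d c.1 c.2 v) c.1 c.2 = v := by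
  obtain ⟨c1, c2⟩ := c
  obtain ⟨h1, h2, h3, h4⟩ := hc
  obtain ⟨hl, hrow⟩ := hs
  simp only [pvGet2, pvSet2]
  rw [pvGetD_modify, if_pos ⟨rfl, by omega⟩, pvGetD_set,
    if_pos ⟨rfl, by rw [hrow c1.toNat (by omega)]; omega⟩]

theorem pvGet2_set2_ne {n : Nat} {d : List (List Int)} {c c' : Int × Int}
    (hc : pvValidC n c) (hc' : pvValidC n c') (hne : c' ≠ c) (v : Int) :
    pvGet2 (pvSet2 d c.1 c.2 v) c'.1 c'.2 = pvGet2 d c'.1 c'.2 := by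
  obtain ⟨c1, c2⟩ := c
  obtain ⟨e1, e2⟩ := c'
  obtain ⟨h1, h2, h3, h4⟩ := hc
  obtain ⟨g1, g2, g3, g4⟩ := hc'
  have hne' : c1.toNat ≠ e1.toNat ∨ c2.toNat ≠ e2.toNat := by
    by_contra hcon
    push_neg at hcon
    exact hne (by simp only [Prod.mk.injEq]; omega)
  simp only [pvGet2, pvSet2]
  rcases hne' with h | h
  · rw [pvGetD_modify, if_neg (by tauto)]
  · rw [pvGetD_modify]
    split
    · rename_i hsplit
      rw [pvGetD_set, if_neg (by tauto)]
    · rfl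

theorem pvGetB_setB_self {n : Nat} {g : List (List Bool)} (hs : pvShape n g) {c : Int × Int}
    (hc : pvValidC n c) : pvGetB (pvSetB g c.1 c.2) c.1 c.2 = true := by
  obtain ⟨c1, c2⟩ := c
  obtain ⟨h1, h2, h3, h4⟩ := hc
  obtain ⟨hl, hrow⟩ := hs
  simp only [pvGetB, pvSetB]
  rw [pvGetD_modify, if_pos ⟨rfl, by omega⟩, pvGetD_set,
    if_pos ⟨rfl, by rw [hrow c1.toNat (by omega)]; omega⟩]

theorem pvGetB_setB_ne {n : Nat} {g : List (List Bool)} {c c' : Int × Int}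
    (hc : pvValidC n c) (hc' : pvValidC n c') (hne : c' ≠ c) :
    pvGetB (pvSetB g c.1 c.2) c'.1 c'.2 = pvGetB g c'.1 c'.2 := by
  obtain ⟨c1, c2⟩ := c
  obtain ⟨e1, e2⟩ := c'
  obtain ⟨h1, h2, h3, h4⟩ := hc
  obtain ⟨g1, g2, g3, g4⟩ := hc'
  have hne' : c1.toNat ≠ e1.toNat ∨ c2.toNat ≠ e2.toNat := by
    by_contra hcon
    push_neg at hcon
    exact hne (by simp only [Prod.mk.injEq]; omega)
  simp only [pvGetB, pvSetB]
  rcases hne' with h | h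
  · rw [pvGetD_modify, if_neg (by tauto)]
  · rw [pvGetD_modify]
    split
    · rename_i hsplit
      rw [pvGetD_set, if_neg (by tauto)]
    · rfl

-- bulk updates
theorem pvShape_foldl_set2 {n : Nat} {d : List (List Int)} (hs : pvShape n d)
    (N : List (Int × Int)) (v : Int) :
    pvShape n (N.foldl (fun dd m => pvSet2 dd m.1 m.2 v) d) := by
  induction N generalizing d with
  | nil => exact hs
  | cons m N ih => exact ih (pvShape_set2 hs m.1 m.2 v)

theorem pvShape_foldl_setB {n : Nat} {g : List (List Bool)} (hs : pvShape n g)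
    (N : List (Int × Int)) :
    pvShape n (N.foldl (fun gg m => pvSetB gg m.1 m.2) g) := by
  induction N generalizing g with
  | nil => exact hs
  | cons m N ih => exact ih (pvShape_setB hs m.1 m.2)

theorem pvGet2_foldl_set2 {n : Nat} {d : List (List Int)} (hs : pvShape n d)
    (N : List (Int × Int)) (hN : ∀ m ∈ N, pvValidC n m) (v : Int) {c : Int × Int}
    (hc : pvValidC n c) :
    pvGet2 (N.foldl (fun dd m => pvSet2 dd m.1 m.2 v) d) c.1 c.2 =
      if c ∈ N then v else pvGet2 d c.1 c.2 := by
  induction N generalizing d with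
  | nil => simp
  | cons m N ih =>
    simp only [List.foldl_cons]
    have hm := hN m (by simp)
    rw [ih (pvShape_set2 hs m.1 m.2 v) (fun x hx => hN x (by simp [hx]))]
    by_cases hcN : c ∈ N
    · simp [hcN]
    · by_cases hcm : c = m
      · subst hcm
        simp [hcN, pvGet2_set2_self hs hc v]
      · simp [hcN, hcm, pvGet2_set2_ne hm hc hcm v]

theorem pvGetB_foldl_setB {n : Nat} {g : List (List Bool)} (hs : pvShape n g)
    (N : List (Int × Int)) (hN : ∀ m ∈ N, pvValidC n m) {c : Int × Int}
    (hc : pvValidC n c) :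
    pvGetB (N.foldl (fun gg m => pvSetB gg m.1 m.2) g) c.1 c.2 =
      (decide (c ∈ N) || pvGetB g c.1 c.2) := by
  induction N generalizing g with
  | nil => simp
  | cons m N ih =>
    simp only [List.foldl_cons]
    have hm := hN m (by simp)
    rw [ih (pvShape_setB hs m.1 m.2) (fun x hx => hN x (by simp [hx]))]
    by_cases hcN : c ∈ N
    · simp [hcN]
    · by_cases hcm : c = m
      · subst hcm
        simp [hcN, pvGetB_setB_self hs hc]
      · simp [hcN, hcm, pvGetB_setB_ne hm hc hcm]

-- ---- land cells ----
theorem mem_landCells {grid : List (List Int)} {c : Int × Int} :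
    c ∈ pvLandCells grid ↔
      pvValidC grid.length c ∧ pvGridVal grid c.1.toNat c.2.toNat ≠ 0 := by
  obtain ⟨c1, c2⟩ := c
  simp only [pvLandCells, List.mem_flatMap, List.mem_filterMap, List.mem_range]
  constructor
  · rintro ⟨i, hi, j, hj, hij⟩
    split at hij
    · rename_i hval
      obtain ⟨rfl, rfl⟩ : (i : Int) = c1 ∧ (j : Int) = c2 := by
        simpa [Prod.ext_iff] using hij
      refine ⟨⟨by omega, by omega, by omega, by omega⟩, by simpa using hval⟩
    · simp at hij
  · rintro ⟨⟨h1, h2, h3, h4⟩, hval⟩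
    refine ⟨c1.toNat, by omega, c2.toNat, by omega, ?_⟩
    rw [if_pos hval]
    simp only [Option.some.injEq, Prod.mk.injEq]
    omega

theorem nodup_landCells (grid : List (List Int)) : (pvLandCells grid).Nodup := by
  rw [pvLandCells, List.nodup_flatMap]
  constructor
  · intro i _
    refine List.Nodup.filterMap ?_ List.nodup_range
    intro a a' b hb hb'
    split at hb
    · simp only [Option.mem_def, Option.some.injEq] at hb
      split at hb'
      · simp only [Option.mem_def, Option.some.injEq] at hb'
        rw [← hb] at hb'
        simp only [Prod.mk.injEq, Nat.cast_inj] at hb'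
        omega
      · simp at hb'
    · simp at hb
  · refine List.pairwise_lt_range.imp ?_
    intro i i' hlt
    intro b hb hb'
    simp only [List.mem_filterMap, List.mem_range] at hb hb'
    obtain ⟨j, _, hj⟩ := hb
    obtain ⟨j', _, hj'⟩ := hb'
    split at hj
    · split at hj'
      · have e1 : (i : Int) = b.1 := by cases hj; rfl
        have e2 : (i' : Int) = b.1 := by cases hj'; rfl
        omega
      · simp at hj'
    · simp at hj

-- ---- properties of pvD ----
theorem pvMd_triangle (a b c : Int × Int) : pvMd a c ≤ pvMd a b + pvMd b c := by
  simp [pvMd]; omega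

theorem pvMd_symm (a b : Int × Int) : pvMd a b = pvMd b a := by
  simp [pvMd]; omega

theorem pvD_spec {grid : List (List Int)} (hL : pvLandCells grid ≠ []) (c : Int × Int) :
    ∃ l ∈ pvLandCells grid, pvD grid c = (pvMd c l : Int) ∧
      ∀ l' ∈ pvLandCells grid, pvD grid c ≤ (pvMd c l' : Int) := by
  have hxs : (pvLandCells grid).map (fun l => (pvMd c l : Int)) ≠ [] := by
    simpa using hL
  cases hmin : PySem.List.min? ((pvLandCells grid).map fun l => (pvMd c l : Int)) (fun v => v) with
  | none => exact absurd ((PySem.List.min?_eq_none_iff _ _).mp hmin) hxs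
  | some m =>
    have hmem := PySem.List.min?_mem hmin
    obtain ⟨l, hl, hml⟩ := List.mem_map.mp hmem
    refine ⟨l, hl, ?_, ?_⟩
    · rw [pvD, hmin, Option.getD_some, ← hml]
    · intro l' hl'
      have hisMin := PySem.List.min?_isMin hmin
      rw [pvD, hmin, Option.getD_some]
      exact hisMin _ (List.mem_map.mpr ⟨l', hl', rfl⟩)

theorem pvD_nonneg {grid : List (List Int)} (hL : pvLandCells grid ≠ []) (c : Int × Int) :
    0 ≤ pvD grid c := by
  obtain ⟨l, _, h1, _⟩ := pvD_spec hL c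
  rw [h1]; positivity

theorem pvD_triangle {grid : List (List Int)} (hL : pvLandCells grid ≠ []) (c c' : Int × Int) :
    pvD grid c ≤ pvD grid c' + (pvMd c c' : Int) := by
  obtain ⟨l, hl, h1, _⟩ := pvD_spec hL c'
  obtain ⟨_, _, _, hmin⟩ := pvD_spec hL c
  have h3 := hmin l hl
  have h4 := pvMd_triangle c c' l
  rw [h1]
  calc pvD grid c ≤ (pvMd c l : Int) := h3
    _ ≤ ((pvMd c c' + pvMd c' l : Nat) : Int) := by exact_mod_cast h4
    _ = (pvMd c' l : Int) + (pvMd c c' : Int) := by push_cast; ring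

theorem pvD_land {grid : List (List Int)} (hL : pvLandCells grid ≠ []) {c : Int × Int}
    (hc : c ∈ pvLandCells grid) : pvD grid c = 0 := by
  obtain ⟨l, hl, h1, hmin⟩ := pvD_spec hL c
  have h2 := hmin c hc
  have h3 : pvMd c c = 0 := by simp [pvMd]
  have := pvD_nonneg hL c
  omega

theorem pvD_zero_mem {grid : List (List Int)} (hL : pvLandCells grid ≠ []) {c : Int × Int}
    (h : pvD grid c = 0) : c ∈ pvLandCells grid := by
  obtain ⟨l, hl, h1, _⟩ := pvD_spec hL c
  have : pvMd c l = 0 := by omega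
  obtain ⟨c1, c2⟩ := c; obtain ⟨l1, l2⟩ := l
  simp [pvMd] at this
  obtain ⟨h1', h2'⟩ := this
  have : c1 = l1 := by omega
  have : c2 = l2 := by omega
  subst_vars
  simpa using hl

theorem pvD_bound {grid : List (List Int)} (hL : pvLandCells grid ≠ []) {c : Int × Int}
    (hc : pvValidC grid.length c) : pvD grid c ≤ 2 * (grid.length : Int) - 2 := by
  obtain ⟨l, hl, h1, _⟩ := pvD_spec hL c
  have hv := (mem_landCells.mp hl).1
  obtain ⟨c1, c2⟩ := c; obtain ⟨l1, l2⟩ := l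
  obtain ⟨a1, a2, a3, a4⟩ := hc
  obtain ⟨b1, b2, b3, b4⟩ := hv
  simp only [pvMd] at h1
  simp only at *
  rw [h1]
  omega

theorem pvD_decrement {grid : List (List Int)} (hL : pvLandCells grid ≠ []) {c : Int × Int}
    (hc : pvValidC grid.length c) (hpos : 0 < pvD grid c) :
    ∃ m, pvValidC grid.length m ∧ pvMd c m = 1 ∧ pvD grid m = pvD grid c - 1 := by
  obtain ⟨l, hl, h1, _⟩ := pvD_spec hL c
  have hstep : ∀ m : Int × Int, pvMd c m = 1 → (pvMd m l : Int) = pvD grid c - 1 →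
      pvD grid m = pvD grid c - 1 := by
    intro m hmd1 hml
    obtain ⟨l0, hl0, hm1, hminm⟩ := pvD_spec hL m
    have t1 := hminm l hl
    have t2 := pvD_triangle hL c m
    rw [hmd1] at t2
    omega
  have hlv := (mem_landCells.mp hl).1
  obtain ⟨c1, c2⟩ := c
  obtain ⟨l1, l2⟩ := l
  obtain ⟨a1, a2, a3, a4⟩ := hc
  obtain ⟨b1, b2, b3, b4⟩ := hlv
  simp only at a1 a2 a3 a4 b1 b2 b3 b4
  simp only [pvMd] at h1
  rcases lt_trichotomy c1 l1 with h | h | h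
  · exact ⟨(c1 + 1, c2), ⟨by dsimp only; omega, by dsimp only; omega, by dsimp only; omega, by dsimp only; omega⟩,
      by simp only [pvMd]; omega, hstep _ (by simp only [pvMd]; omega) (by simp only [pvMd]; omega)⟩
  · have hc2 : c2 ≠ l2 := by
      intro hcon
      subst hcon; subst h
      simp at h1
      omega
    rcases lt_trichotomy c2 l2 with h' | h' | h'
    · exact ⟨(c1, c2 + 1), ⟨by dsimp only; omega, by dsimp only; omega, by dsimp only; omega, by dsimp only; omega⟩,
        by simp only [pvMd]; omega, hstep _ (by simp only [pvMd]; omega) (by simp only [pvMd]; omega)⟩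
    · exact absurd h' hc2
    · exact ⟨(c1, c2 - 1), ⟨by dsimp only; omega, by dsimp only; omega, by dsimp only; omega, by dsimp only; omega⟩,
        by simp only [pvMd]; omega, hstep _ (by simp only [pvMd]; omega) (by simp only [pvMd]; omega)⟩
  · exact ⟨(c1 - 1, c2), ⟨by dsimp only; omega, by dsimp only; omega, by dsimp only; omega, by dsimp only; omega⟩,
      by simp only [pvMd]; omega, hstep _ (by simp only [pvMd]; omega) (by simp only [pvMd]; omega)⟩

theorem mem_nbrs_iff {x y : Int} {m : Int × Int} : m ∈ pvNbrs x y ↔ pvMd (x, y) m = 1 := by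
  obtain ⟨m1, m2⟩ := m
  simp [pvNbrs, pvDirections, pvMd, Prod.ext_iff]
  omega

theorem nodup_nbrs (x y : Int) : (pvNbrs x y).Nodup := by
  simp [pvNbrs, pvDirections, Prod.ext_iff]

theorem self_not_mem_nbrs (x y : Int) : (x, y) ∉ pvNbrs x y := by
  simp [pvNbrs, pvDirections, Prod.ext_iff]

-- ---- generic fold lemmas ----
theorem pvFoldl_pred {α : Type} (P : Int → Prop) (l : List α) (g : Int → α → Int) (a : Int)
    (ha : P a) (hstep : ∀ acc x, x ∈ l → P acc → P (g acc x)) : P (l.foldl g a) := by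
  induction l generalizing a with
  | nil => exact ha
  | cons x l ih =>
    exact ih _ (hstep a x (by simp) ha) (fun acc z hz hacc => hstep acc z (by simp [hz]) hacc)

theorem pvFoldl_const_max {α : Type} (l : List α) (v a : Int) :
    l.foldl (fun acc _ => max acc v) a = if l.isEmpty then a else a ⊔ v := by
  induction l generalizing a with
  | nil => simp
  | cons x l ih =>
    simp only [List.foldl_cons, ih, List.isEmpty_cons]
    by_cases h : l.isEmpty <;> simp [h, max_assoc]

-- ---- the initialisation loop ----
theorem pvCellEq {n : Nat} {c : Int × Int} (hc : pvValidC n c) {p1 p2 : Nat}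
    (h1 : c.1.toNat = p1) (h2 : c.2.toNat = p2) : c = ((p1 : Int), (p2 : Int)) := by
  obtain ⟨x, y⟩ := c
  obtain ⟨a1, a2, a3, a4⟩ := hc
  simp only [Prod.mk.injEq]
  omega

theorem pvShape_replicate {α : Type} (n : Nat) (v : α) :
    pvShape n (List.replicate n (List.replicate n v)) := by
  refine ⟨by simp, fun i hi => ?_⟩
  rw [List.getD_eq_getElem?_getD, List.getElem?_replicate, if_pos hi]
  simp

theorem pvInitFold_spec {grid : List (List Int)} {n : Nat} (ps : List (Nat × Nat))
    (d : List (List Int)) (inQ : List (List Bool)) (q : List (Int × Int))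
    (hps : ∀ p ∈ ps, p.1 < n ∧ p.2 < n) (hd : pvShape n d) (hq : pvShape n inQ) :
    pvShape n (ps.foldl (pvInitStep grid) (d, inQ, q)).1 ∧
    pvShape n (ps.foldl (pvInitStep grid) (d, inQ, q)).2.1 ∧
    (ps.foldl (pvInitStep grid) (d, inQ, q)).2.2 =
      q ++ ps.filterMap (fun p =>
        if pvGridVal grid p.1 p.2 ≠ 0 then some ((p.1 : Int), (p.2 : Int)) else none) ∧
    (∀ c : Int × Int, pvValidC n c →
      pvGet2 (ps.foldl (pvInitStep grid) (d, inQ, q)).1 c.1 c.2 =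
        if (c.1.toNat, c.2.toNat) ∈ ps ∧ pvGridVal grid c.1.toNat c.2.toNat ≠ 0 then 0
        else pvGet2 d c.1 c.2) ∧
    (∀ c : Int × Int, pvValidC n c →
      (pvGetB (ps.foldl (pvInitStep grid) (d, inQ, q)).2.1 c.1 c.2 = true ↔
        ((c.1.toNat, c.2.toNat) ∈ ps ∧ pvGridVal grid c.1.toNat c.2.toNat ≠ 0) ∨
          pvGetB inQ c.1 c.2 = true)) := by
  induction ps generalizing d inQ q with
  | nil => exact ⟨hd, hq, by simp, fun c _ => by simp, fun c _ => by simp⟩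
  | cons p ps ih =>
    obtain ⟨p1, p2⟩ := p
    have hpv : pvValidC n ((p1 : Int), (p2 : Int)) := by
      obtain ⟨h1, h2⟩ := hps (p1, p2) (by simp)
      exact ⟨by omega, by omega, by omega, by omega⟩
    simp only [List.foldl_cons]
    by_cases hval : pvGridVal grid p1 p2 ≠ 0
    · have hstep : pvInitStep grid (d, inQ, q) (p1, p2) =
        (pvSet2 d (p1 : Int) (p2 : Int) 0, pvSetB inQ (p1 : Int) (p2 : Int),
         q ++ [((p1 : Int), (p2 : Int))]) := by
        simp [pvInitStep, hval]
      rw [hstep]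
      obtain ⟨s1, s2, s3, s4, s5⟩ := ih _ _ _ (fun x hx => hps x (by simp [hx]))
        (pvShape_set2 hd _ _ _) (pvShape_setB hq _ _)
      refine ⟨s1, s2, ?_, ?_, ?_⟩
      · rw [s3]
        simp [List.filterMap_cons, hval]
      · intro c hc
        rw [s4 c hc]
        by_cases hmem : (c.1.toNat, c.2.toNat) ∈ ps ∧ pvGridVal grid c.1.toNat c.2.toNat ≠ 0
        · rw [if_pos hmem, if_pos ⟨by simp [hmem.1], hmem.2⟩]
        · rw [if_neg hmem]
          by_cases hcp : c.1.toNat = p1 ∧ c.2.toNat = p2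
          · have hceq := pvCellEq hc hcp.1 hcp.2
            rw [if_pos ⟨by simp [hcp.1, hcp.2], by rw [hcp.1, hcp.2]; exact hval⟩, hceq]
            exact pvGet2_set2_self hd hpv 0
          · have hne : c ≠ ((p1 : Int), (p2 : Int)) := by
              intro hcon
              exact hcp (by rw [hcon]; simp)
            rw [pvGet2_set2_ne hpv hc hne 0, if_neg]
            intro ⟨hm, hv⟩
            rcases List.mem_cons.mp hm with h | h
            · exact hcp (by simpa using h)
            · exact hmem ⟨h, hv⟩
      · intro c hc
        rw [s5 c hc]
        by_cases hcp : c.1.toNat = p1 ∧ c.2.toNat = p2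
        · have hceq := pvCellEq hc hcp.1 hcp.2
          constructor
          · intro _
            exact Or.inl ⟨by simp [hcp.1, hcp.2], by rw [hcp.1, hcp.2]; exact hval⟩
          · intro _
            right
            rw [hceq]
            exact pvGetB_setB_self hq hpv
        · have hne : c ≠ ((p1 : Int), (p2 : Int)) := by
            intro hcon
            exact hcp (by rw [hcon]; simp)
          rw [pvGetB_setB_ne hpv hc hne]
          constructor
          · rintro (⟨hm, hv⟩ | h)
            · exact Or.inl ⟨by simp [hm], hv⟩
            · exact Or.inr h
          · rintro (⟨hm, hv⟩ | h)
            · rcases List.mem_cons.mp hm with h' | h'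
              · exact absurd (by simpa using h') hcp
              · exact Or.inl ⟨h', hv⟩
            · exact Or.inr h
    · have hstep : pvInitStep grid (d, inQ, q) (p1, p2) = (d, inQ, q) := by
        simp [pvInitStep, hval]
      rw [hstep]
      obtain ⟨s1, s2, s3, s4, s5⟩ := ih _ _ _ (fun x hx => hps x (by simp [hx])) hd hq
      refine ⟨s1, s2, ?_, ?_, ?_⟩
      · rw [s3]
        simp [List.filterMap_cons, hval]
      · intro c hc
        rw [s4 c hc]
        congr 1
        simp only [eq_iff_iff, List.mem_cons]
        constructor
        · rintro ⟨hm, hv⟩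
          exact ⟨Or.inr hm, hv⟩
        · rintro ⟨hm | hm, hv⟩
          · obtain ⟨e1, e2⟩ : c.1.toNat = p1 ∧ c.2.toNat = p2 := by simpa using hm
            rw [e1, e2] at hv
            exact absurd hv hval
          · exact ⟨hm, hv⟩
      · intro c hc
        rw [s5 c hc]
        constructor
        · rintro (⟨hm, hv⟩ | h)
          · exact Or.inl ⟨by simp [hm], hv⟩
          · exact Or.inr h
        · rintro (⟨hm, hv⟩ | h)
          · rcases List.mem_cons.mp hm with h' | h'
            · obtain ⟨e1, e2⟩ : c.1.toNat = p1 ∧ c.2.toNat = p2 := by simpa using h'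
              rw [e1, e2] at hv
              exact absurd hv hval
            · exact Or.inl ⟨h', hv⟩
          · exact Or.inr h

theorem pvInit_spec (grid : List (List Int)) :
    pvShape grid.length (pvInit grid grid.length).1 ∧
    pvShape grid.length (pvInit grid grid.length).2.1 ∧
    (pvInit grid grid.length).2.2 = pvLandCells grid ∧
    (∀ c : Int × Int, pvValidC grid.length c →
      pvGet2 (pvInit grid grid.length).1 c.1 c.2 =
        if pvGridVal grid c.1.toNat c.2.toNat ≠ 0 then 0 else pvInf grid.length) ∧
    (∀ c : Int × Int, pvValidC grid.length c →
      (pvGetB (pvInit grid grid.length).2.1 c.1 c.2 = true ↔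
        pvGridVal grid c.1.toNat c.2.toNat ≠ 0)) := by
  set n := grid.length with hn
  unfold pvInit
  have hps : ∀ p ∈ (List.range n).flatMap (fun i => (List.range n).map (fun j => (i, j))),
      p.1 < n ∧ p.2 < n := by
    intro p hp
    simp only [List.mem_flatMap, List.mem_map, List.mem_range] at hp
    obtain ⟨i, hi, j, hj, rfl⟩ := hp
    exact ⟨hi, hj⟩
  obtain ⟨s1, s2, s3, s4, s5⟩ := pvInitFold_spec (grid := grid) (n := n)
    ((List.range n).flatMap (fun i => (List.range n).map (fun j => (i, j))))
    (List.replicate n (List.replicate n (pvInf n)))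
    (List.replicate n (List.replicate n false)) [] hps
    (pvShape_replicate n (pvInf n)) (pvShape_replicate n false)
  have hmemp : ∀ c : Int × Int, pvValidC n c →
      (c.1.toNat, c.2.toNat) ∈
        (List.range n).flatMap (fun i => (List.range n).map (fun j => (i, j))) := by
    intro c hc
    obtain ⟨a1, a2, a3, a4⟩ := hc
    simp only [List.mem_flatMap, List.mem_map, List.mem_range]
    exact ⟨c.1.toNat, by omega, c.2.toNat, by omega, rfl⟩
  refine ⟨s1, s2, ?_, ?_, ?_⟩
  · rw [s3]
    simp only [List.nil_append]
    rw [List.filterMap_flatMap]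
    rw [pvLandCells, ← hn]
    congr 1
    funext i
    rw [List.filterMap_map]
    rfl
  · intro c hc
    rw [s4 c hc]
    by_cases hval : pvGridVal grid c.1.toNat c.2.toNat ≠ 0
    · rw [if_pos ⟨hmemp c hc, hval⟩, if_pos hval]
    · rw [if_neg (fun h => hval h.2), if_neg hval]
      obtain ⟨a1, a2, a3, a4⟩ := hc
      exact pvGet2_replicate n (pvInf n) c.1 c.2 (by omega) (by omega)
  · intro c hc
    rw [s5 c hc]
    obtain ⟨a1, a2, a3, a4⟩ := hc
    rw [pvGetB_replicate n c.1 c.2 (by omega) (by omega)]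
    constructor
    · rintro (⟨_, hv⟩ | h)
      · exact hv
      · simp at h
    · intro hv
      exact Or.inl ⟨hmemp c ⟨a1, a2, a3, a4⟩, hv⟩

-- ---- one round of the BFS loop, characterised ----
theorem pvRelaxFold_char {n : Nat} (x y : Int) (dirs : List (Int × Int))
    (d : List (List Int)) (inQ : List (List Bool)) (q : List (Int × Int))
    (hxy : pvValidC n (x, y))
    (hnd : (dirs.map fun dd => (x + dd.1, y + dd.2)).Nodup)
    (hself : (x, y) ∉ dirs.map fun dd => (x + dd.1, y + dd.2))
    (hdisc : ∀ c ∈ dirs.map fun dd => (x + dd.1, y + dd.2), pvValidC n c →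
      pvGetB inQ c.1 c.2 = true → pvGet2 d c.1 c.2 ≤ pvGet2 d x y + 1)
    (hundisc : ∀ c ∈ dirs.map fun dd => (x + dd.1, y + dd.2), pvValidC n c →
      pvGetB inQ c.1 c.2 = false → pvGet2 d c.1 c.2 = pvInf n)
    (hbound : pvGet2 d x y + 1 < pvInf n) :
    dirs.foldl (pvRelax n x y) (d, inQ, q) =
      (((dirs.map fun dd => (x + dd.1, y + dd.2)).filter
           (fun c => pvIsValid n c.1 c.2 && !pvGetB inQ c.1 c.2)).foldl
          (fun dd m => pvSet2 dd m.1 m.2 (pvGet2 d x y + 1)) d,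
       ((dirs.map fun dd => (x + dd.1, y + dd.2)).filter
           (fun c => pvIsValid n c.1 c.2 && !pvGetB inQ c.1 c.2)).foldl
          (fun gg m => pvSetB gg m.1 m.2) inQ,
       q ++ (dirs.map fun dd => (x + dd.1, y + dd.2)).filter
           (fun c => pvIsValid n c.1 c.2 && !pvGetB inQ c.1 c.2)) := by
  induction dirs generalizing d inQ q with
  | nil => simp
  | cons dd dirs ih =>
    simp only [List.map_cons] at hnd hself hdisc hundisc
    simp only [List.map_cons, List.foldl_cons, List.filter_cons]
    by_cases hv : pvIsValid n (x + dd.1) (y + dd.2) = true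
    · have hc1v : pvValidC n (x + dd.1, y + dd.2) := (pvIsValid_iff n _).mp hv
      have hxne : (x, y) ≠ (x + dd.1, y + dd.2) := fun h => hself (h ▸ List.mem_cons_self)
      cases hb : pvGetB inQ (x + dd.1) (y + dd.2) with
      | true =>
        have hle := hdisc _ List.mem_cons_self hc1v hb
        dsimp only at hle
        have hrelax : pvRelax n x y (d, inQ, q) dd = (d, inQ, q) := by
          simp only [pvRelax, hv, hb]
          rw [if_neg (by simp; omega)]
        rw [hrelax]
        simp only [Bool.not_true, Bool.and_false, Bool.false_eq_true, if_false]
        exact ih d inQ q hnd.of_cons (fun h => hself (List.mem_cons_of_mem _ h))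
          (fun c hc => hdisc c (List.mem_cons_of_mem _ hc))
          (fun c hc => hundisc c (List.mem_cons_of_mem _ hc)) hbound
      | false =>
        have hinf := hundisc _ List.mem_cons_self hc1v hb
        dsimp only at hinf
        have hrelax : pvRelax n x y (d, inQ, q) dd =
            (pvSet2 d (x + dd.1) (y + dd.2) (pvGet2 d x y + 1),
             pvSetB inQ (x + dd.1) (y + dd.2), q ++ [(x + dd.1, y + dd.2)]) := by
          simp only [pvRelax, hv, hb]
          rw [if_pos (by simp; omega)]
          simp
        rw [hrelax]
        simp only [Bool.not_false, Bool.and_true, hv, if_true]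
        have hc1nm : (x + dd.1, y + dd.2) ∉ dirs.map fun e => (x + e.1, y + e.2) := by
          intro h
          exact (List.nodup_cons.mp hnd).1 h
        have hg2xy : pvGet2 (pvSet2 d (x + dd.1) (y + dd.2) (pvGet2 d x y + 1)) x y =
            pvGet2 d x y := pvGet2_set2_ne hc1v hxy hxne _
        have hg2 : ∀ c ∈ dirs.map fun e => (x + e.1, y + e.2), pvValidC n c →
            pvGet2 (pvSet2 d (x + dd.1) (y + dd.2) (pvGet2 d x y + 1)) c.1 c.2 =
              pvGet2 d c.1 c.2 := by
          intro c hc hcv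
          exact pvGet2_set2_ne hc1v hcv (fun h => hc1nm (h ▸ hc)) _
        have hgB : ∀ c ∈ dirs.map fun e => (x + e.1, y + e.2), pvValidC n c →
            pvGetB (pvSetB inQ (x + dd.1) (y + dd.2)) c.1 c.2 = pvGetB inQ c.1 c.2 := by
          intro c hc hcv
          exact pvGetB_setB_ne hc1v hcv (fun h => hc1nm (h ▸ hc))
        have hself' : (x, y) ∉ dirs.map fun e => (x + e.1, y + e.2) :=
          fun h => hself (List.mem_cons_of_mem _ h)
        have hdisc' : ∀ c ∈ dirs.map fun e => (x + e.1, y + e.2), pvValidC n c →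
            pvGetB (pvSetB inQ (x + dd.1) (y + dd.2)) c.1 c.2 = true →
            pvGet2 (pvSet2 d (x + dd.1) (y + dd.2) (pvGet2 d x y + 1)) c.1 c.2 ≤
              pvGet2 (pvSet2 d (x + dd.1) (y + dd.2) (pvGet2 d x y + 1)) x y + 1 := by
          intro c hc hcv hcb
          rw [hgB c hc hcv] at hcb
          rw [hg2 c hc hcv, hg2xy]
          exact hdisc c (List.mem_cons_of_mem _ hc) hcv hcb
        have hundisc' : ∀ c ∈ dirs.map fun e => (x + e.1, y + e.2), pvValidC n c →
            pvGetB (pvSetB inQ (x + dd.1) (y + dd.2)) c.1 c.2 = false →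
            pvGet2 (pvSet2 d (x + dd.1) (y + dd.2) (pvGet2 d x y + 1)) c.1 c.2 = pvInf n := by
          intro c hc hcv hcb
          rw [hgB c hc hcv] at hcb
          rw [hg2 c hc hcv]
          exact hundisc c (List.mem_cons_of_mem _ hc) hcv hcb
        have hbound' : pvGet2 (pvSet2 d (x + dd.1) (y + dd.2) (pvGet2 d x y + 1)) x y + 1 <
            pvInf n := by rw [hg2xy]; exact hbound
        rw [ih _ _ _ hnd.of_cons hself' hdisc' hundisc' hbound']
        rw [hg2xy]
        have hfil : (dirs.map fun e => (x + e.1, y + e.2)).filter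
            (fun c => pvIsValid n c.1 c.2 && !pvGetB (pvSetB inQ (x + dd.1) (y + dd.2)) c.1 c.2) =
            (dirs.map fun e => (x + e.1, y + e.2)).filter
            (fun c => pvIsValid n c.1 c.2 && !pvGetB inQ c.1 c.2) := by
          apply List.filter_congr
          intro c hc
          by_cases hcv : pvValidC n c
          · rw [hgB c hc hcv]
          · have hvf : pvIsValid n c.1 c.2 = false := by
              rw [← Bool.not_eq_true]
              exact fun h => hcv ((pvIsValid_iff n c).mp h)
            simp [hvf]
        rw [hfil]
        simp [List.foldl_cons, List.append_assoc]
    · have hrelax : pvRelax n x y (d, inQ, q) dd = (d, inQ, q) := by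
        simp only [pvRelax]
        rw [if_neg (by simp [hv])]
      rw [hrelax]
      have hpred : (pvIsValid n (x + dd.1) (y + dd.2) && !pvGetB inQ (x + dd.1) (y + dd.2))
          = false := by simp [hv]
      rw [hpred]
      simp only [Bool.false_eq_true, if_false]
      exact ih d inQ q hnd.of_cons (fun h => hself (List.mem_cons_of_mem _ h))
        (fun c hc => hdisc c (List.mem_cons_of_mem _ hc))
        (fun c hc => hundisc c (List.mem_cons_of_mem _ hc)) hbound

-- ---- the BFS loop invariant ----
structure PvInv (grid : List (List Int)) (d : List (List Int)) (inQ : List (List Bool))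
    (queue : List (Int × Int)) : Prop where
  shd : pvShape grid.length d
  shq : pvShape grid.length inQ
  dfin : ∀ c : Int × Int, pvValidC grid.length c → pvGetB inQ c.1 c.2 = true →
    pvGet2 d c.1 c.2 = pvD grid c
  dinf : ∀ c : Int × Int, pvValidC grid.length c → pvGetB inQ c.1 c.2 = false →
    pvGet2 d c.1 c.2 = pvInf grid.length
  qnd : queue.Nodup
  qmem : ∀ c ∈ queue, pvValidC grid.length c ∧ pvGetB inQ c.1 c.2 = true
  landDisc : ∀ l ∈ pvLandCells grid, pvGetB inQ l.1 l.2 = true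
  closed : ∀ c : Int × Int, pvValidC grid.length c → pvGetB inQ c.1 c.2 = true → c ∉ queue →
    ∀ m : Int × Int, pvValidC grid.length m → pvMd c m = 1 → pvGetB inQ m.1 m.2 = true
  qlayer : queue = [] ∨ ∃ (k : Int) (qa qb : List (Int × Int)), queue = qa ++ qb ∧ qa ≠ [] ∧
    (∀ c ∈ qa, pvD grid c = k) ∧ (∀ c ∈ qb, pvD grid c = k + 1) ∧
    (∀ c : Int × Int, pvValidC grid.length c → pvD grid c < k →
      pvGetB inQ c.1 c.2 = true ∧ c ∉ queue)

theorem pvLayerDisc {grid d inQ queue} (hL : pvLandCells grid ≠ [])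
    (hI : PvInv grid d inQ queue) {c : Int × Int} (hc : pvValidC grid.length c)
    (hall : ∀ m : Int × Int, pvValidC grid.length m → pvD grid m < pvD grid c →
      pvGetB inQ m.1 m.2 = true ∧ m ∉ queue) :
    pvGetB inQ c.1 c.2 = true := by
  by_cases h0 : pvD grid c = 0
  · exact hI.landDisc c (pvD_zero_mem hL h0)
  · have hpos : 0 < pvD grid c := by
      have := pvD_nonneg hL c
      omega
    obtain ⟨m, hmv, hmd, hmD⟩ := pvD_decrement hL hc hpos
    obtain ⟨hmB, hmQ⟩ := hall m hmv (by omega)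
    exact hI.closed m hmv hmB hmQ c hc (by rw [pvMd_symm]; exact hmd)

-- ---- the invariant is preserved by one round of the loop ----
theorem pvStep {grid : List (List Int)} {d : List (List Int)} {inQ : List (List Bool)}
    {x y : Int} {rest : List (Int × Int)} (hL : pvLandCells grid ≠ [])
    (hI : PvInv grid d inQ ((x, y) :: rest)) :
    PvInv grid (pvDirections.foldl (pvRelax grid.length x y) (d, inQ, rest)).1
      (pvDirections.foldl (pvRelax grid.length x y) (d, inQ, rest)).2.1
      (pvDirections.foldl (pvRelax grid.length x y) (d, inQ, rest)).2.2 := by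
  set n := grid.length with hn
  obtain ⟨hxyv, hxyb⟩ := hI.qmem (x, y) List.mem_cons_self
  have hn1 : 1 ≤ (n : Int) := by
    obtain ⟨a1, a2, _, _⟩ := hxyv
    simp only at a1 a2
    omega
  have hdxy : pvGet2 d x y = pvD grid (x, y) := hI.dfin (x, y) hxyv hxyb
  have hbound : pvGet2 d x y + 1 < pvInf n := by
    have h1 := pvD_bound hL hxyv
    have h2 : (2 : Int) * n - 2 + 1 < 2 * ((n : Int) * n) := by nlinarith [hn1]
    rw [← hn] at h1
    rw [hdxy, pvInf]
    omega
  have hdisc : ∀ c ∈ pvNbrs x y, pvValidC n c → pvGetB inQ c.1 c.2 = true →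
      pvGet2 d c.1 c.2 ≤ pvGet2 d x y + 1 := by
    intro c hcm hcv hcb
    rw [hI.dfin c hcv hcb, hdxy]
    have ht := pvD_triangle hL c (x, y)
    rw [pvMd_symm, mem_nbrs_iff.mp hcm] at ht
    simpa using ht
  have hundisc : ∀ c ∈ pvNbrs x y, pvValidC n c → pvGetB inQ c.1 c.2 = false →
      pvGet2 d c.1 c.2 = pvInf n := fun c _ hcv hcb => hI.dinf c hcv hcb
  have hchar := pvRelaxFold_char (n := n) x y pvDirections d inQ rest hxyv
    (nodup_nbrs x y) (self_not_mem_nbrs x y) hdisc hundisc hbound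
  rw [hchar]
  dsimp only
  rw [show (pvDirections.map fun dd => (x + dd.1, y + dd.2)) = pvNbrs x y from rfl]
  set N := (pvNbrs x y).filter (fun c => pvIsValid n c.1 c.2 && !pvGetB inQ c.1 c.2) with hNdef
  have hNv : ∀ m ∈ N, pvValidC n m := by
    intro m hm
    have := (List.mem_filter.mp hm).2
    simp only [Bool.and_eq_true, Bool.not_eq_true'] at this
    exact (pvIsValid_iff n m).mp this.1
  have hNund : ∀ m ∈ N, pvGetB inQ m.1 m.2 = false := by
    intro m hm
    have := (List.mem_filter.mp hm).2
    simp only [Bool.and_eq_true, Bool.not_eq_true'] at this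
    exact this.2
  have hNnb : ∀ m ∈ N, pvMd (x, y) m = 1 := fun m hm =>
    mem_nbrs_iff.mp (List.mem_filter.mp hm).1
  have hNnd : N.Nodup := (nodup_nbrs x y).filter _
  rcases hI.qlayer with hq0 | ⟨k, qa, qb, heq, hqa, hka, hkb, hQ2⟩
  · exact absurd hq0 (by simp)
  obtain ⟨qa', rfl⟩ : ∃ qa', qa = (x, y) :: qa' := by
    cases qa with
    | nil => exact absurd rfl hqa
    | cons a qa' =>
      have ha : a = (x, y) := by
        have h := heq
        rw [List.cons_append, List.cons.injEq] at h
        exact h.1.symm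
      exact ⟨qa', by rw [ha]⟩
  have hrest : rest = qa' ++ qb := by
    have h := heq
    rw [List.cons_append, List.cons.injEq] at h
    exact h.2
  have hkx : pvD grid (x, y) = k := hka _ List.mem_cons_self
  have hND : ∀ m ∈ N, pvD grid m = k + 1 := by
    intro m hm
    have hmv := hNv m hm
    have hmB := hNund m hm
    have ht : pvD grid m ≤ k + 1 := by
      have ht1 := pvD_triangle hL m (x, y)
      have hmd1 : pvMd m (x, y) = 1 := by rw [pvMd_symm]; exact hNnb m hm
      rw [hmd1, hkx] at ht1
      simpa using ht1
    by_cases hlt : pvD grid m < k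
    · have := (hQ2 m hmv hlt).1
      rw [hmB] at this
      cases this
    · by_cases heqk : pvD grid m = k
      · have hd2 : pvGetB inQ m.1 m.2 = true := by
          refine pvLayerDisc hL hI hmv ?_
          intro m' hm'v hm'lt
          rw [heqk] at hm'lt
          exact hQ2 m' hm'v hm'lt
        rw [hmB] at hd2
        cases hd2
      · omega
  have hv : pvGet2 d x y + 1 = k + 1 := by rw [hdxy, hkx]
  have hD' : ∀ c : Int × Int, pvValidC n c →
      pvGet2 (N.foldl (fun dd m => pvSet2 dd m.1 m.2 (pvGet2 d x y + 1)) d) c.1 c.2 =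
        if c ∈ N then pvGet2 d x y + 1 else pvGet2 d c.1 c.2 :=
    fun c hc => pvGet2_foldl_set2 hI.shd N hNv _ hc
  have hQ' : ∀ c : Int × Int, pvValidC n c →
      pvGetB (N.foldl (fun gg m => pvSetB gg m.1 m.2) inQ) c.1 c.2 =
        (decide (c ∈ N) || pvGetB inQ c.1 c.2) :=
    fun c hc => pvGetB_foldl_setB hI.shq N hNv hc
  have hrnd : rest.Nodup := (List.nodup_cons.mp hI.qnd).2
  refine ⟨pvShape_foldl_set2 hI.shd N _, pvShape_foldl_setB hI.shq N, ?_, ?_, ?_, ?_, ?_, ?_, ?_⟩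
  · -- dfin
    intro c hc hcb
    rw [hQ' c hc] at hcb
    rw [hD' c hc]
    simp only [Bool.or_eq_true, decide_eq_true_eq] at hcb
    by_cases hcN : c ∈ N
    · rw [if_pos hcN, hv, hND c hcN]
    · rw [if_neg hcN]
      rcases hcb with h | h
      · exact absurd h hcN
      · exact hI.dfin c hc h
  · -- dinf
    intro c hc hcb
    rw [hQ' c hc] at hcb
    rw [hD' c hc]
    simp only [Bool.or_eq_false_iff, decide_eq_false_iff_not] at hcb
    rw [if_neg hcb.1]
    exact hI.dinf c hc hcb.2
  · -- qnd
    refine List.Nodup.append hrnd hNnd ?_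
    intro c hcr hcN
    have h1 := (hI.qmem c (List.mem_cons_of_mem _ hcr)).2
    rw [hNund c hcN] at h1
    cases h1
  · -- qmem
    intro c hc
    rcases List.mem_append.mp hc with h | h
    · obtain ⟨hv1, hv2⟩ := hI.qmem c (List.mem_cons_of_mem _ h)
      exact ⟨hv1, by rw [hQ' c hv1, hv2]; simp⟩
    · exact ⟨hNv c h, by rw [hQ' c (hNv c h)]; simp [h]⟩
  · -- landDisc
    intro l hl
    have hlv := (mem_landCells.mp hl).1
    rw [hQ' l hlv, hI.landDisc l hl]
    simp
  · -- closed
    intro c hc hcb hcq m hmv hmd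
    rw [hQ' m hmv]
    simp only [Bool.or_eq_true, decide_eq_true_eq]
    rw [hQ' c hc] at hcb
    simp only [Bool.or_eq_true, decide_eq_true_eq] at hcb
    have hcN : c ∉ N := fun h => hcq (List.mem_append.mpr (Or.inr h))
    have hcbo : pvGetB inQ c.1 c.2 = true := by tauto
    by_cases hcxy : c = (x, y)
    · rw [hcxy] at hmd
      have hm' : m ∈ pvNbrs x y := mem_nbrs_iff.mpr hmd
      by_cases hb : pvGetB inQ m.1 m.2 = true
      · exact Or.inr hb
      · refine Or.inl (List.mem_filter.mpr ⟨hm', ?_⟩)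
        simp only [Bool.and_eq_true, Bool.not_eq_true']
        exact ⟨(pvIsValid_iff n m).mpr hmv, by simpa using hb⟩
    · have hcr : c ∉ rest := fun h => hcq (List.mem_append.mpr (Or.inl h))
      have hnotq : c ∉ (x, y) :: rest := by simp [hcxy, hcr]
      exact Or.inr (hI.closed c hc hcbo hnotq m hmv hmd)
  · -- qlayer
    by_cases hqe : rest ++ N = []
    · exact Or.inl hqe
    right
    by_cases hqa' : qa' = []
    · subst hqa'
      have hrb : rest = qb := by simpa using hrest
      subst hrb
      refine ⟨k + 1, rest ++ N, [], by simp, hqe, ?_, by simp, ?_⟩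
      · intro c hc
        rcases List.mem_append.mp hc with h | h
        · exact hkb c h
        · exact hND c h
      · intro c hcv hclt
        by_cases hck : pvD grid c < k
        · obtain ⟨h1, h2⟩ := hQ2 c hcv hck
          refine ⟨by rw [hQ' c hcv, h1]; simp, ?_⟩
          intro hmem
          rcases List.mem_append.mp hmem with h | h
          · exact h2 (List.mem_cons_of_mem _ h)
          · rw [hNund c h] at h1; cases h1
        · have hck' : pvD grid c = k := by omega
          have hdc : pvGetB inQ c.1 c.2 = true := by
            refine pvLayerDisc hL hI hcv ?_
            intro m' hm'v hm'lt
            rw [hck'] at hm'lt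
            exact hQ2 m' hm'v hm'lt
          refine ⟨by rw [hQ' c hcv, hdc]; simp, ?_⟩
          intro hmem
          rcases List.mem_append.mp hmem with h | h
          · have := hkb c h
            omega
          · rw [hNund c h] at hdc; cases hdc
    · refine ⟨k, qa', qb ++ N, by rw [hrest]; simp, hqa', ?_, ?_, ?_⟩
      · exact fun c hc => hka c (List.mem_cons_of_mem _ hc)
      · intro c hc
        rcases List.mem_append.mp hc with h | h
        · exact hkb c h
        · exact hND c h
      · intro c hcv hclt
        obtain ⟨h1, h2⟩ := hQ2 c hcv hclt
        refine ⟨by rw [hQ' c hcv, h1]; simp, ?_⟩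
        rw [hrest] at h2
        intro hmem
        rcases List.mem_append.mp hmem with h | h
        · rw [hrest] at h
          exact h2 (List.mem_cons_of_mem _ h)
        · rw [hNund c h] at h1; cases h1

-- ---- termination state: every cell is discovered ----
theorem pvAllDisc {grid : List (List Int)} {d : List (List Int)} {inQ : List (List Bool)}
    (hL : pvLandCells grid ≠ []) (hI : PvInv grid d inQ []) :
    ∀ c : Int × Int, pvValidC grid.length c → pvGetB inQ c.1 c.2 = true := by
  have key : ∀ (B : Nat) (c : Int × Int), pvValidC grid.length c → (pvD grid c).toNat ≤ B →
      pvGetB inQ c.1 c.2 = true := by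
    intro B
    induction B with
    | zero =>
      intro c hc hB
      have h0 : pvD grid c = 0 := by
        have := pvD_nonneg hL c
        omega
      exact hI.landDisc c (pvD_zero_mem hL h0)
    | succ B ih =>
      intro c hc hB
      by_cases hB' : (pvD grid c).toNat ≤ B
      · exact ih c hc hB'
      · have hpos : 0 < pvD grid c := by omega
        obtain ⟨m, hmv, hmd, hmD⟩ := pvD_decrement hL hc hpos
        have hm : pvGetB inQ m.1 m.2 = true := ih m hmv (by omega)
        exact hI.closed m hmv hm (by simp) c hc (by rw [pvMd_symm]; exact hmd)
  intro c hc
  exact key (pvD grid c).toNat c hc le_rfl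

-- ---- the BFS loop computes the Manhattan distance transform ----
theorem pvBfs_correct {grid : List (List Int)} (hL : pvLandCells grid ≠ [])
    (d : List (List Int)) (inQ : List (List Bool)) (queue : List (Int × Int))
    (hI : PvInv grid d inQ queue) :
    ∀ c : Int × Int, pvValidC grid.length c →
      pvGet2 (pvBfs grid.length d inQ queue) c.1 c.2 = pvD grid c := by
  generalize hM : 2 * pvCountFalse inQ + queue.length = M
  induction M using Nat.strong_induction_on generalizing d inQ queue with
  | _ M ih =>
    cases queue with
    | nil =>
      rw [pvBfs]
      intro c hc
      exact hI.dfin c hc (pvAllDisc hL hI c hc)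
    | cons hd rest =>
      obtain ⟨x, y⟩ := hd
      rw [pvBfs]
      have hstep := pvStep hL hI
      have hmeas := pvRelaxFold_measure grid.length x y pvDirections (d, inQ, rest)
      dsimp only at hmeas
      refine ih _ ?_ _ _ _ hstep rfl
      simp only [List.length_cons] at hM
      omega

theorem maxDistance4_main (grid : List (List Int)) :
    maxDistance4 grid = maxDistance4_alt grid := by
  obtain ⟨s1, s2, s3, s4, s5⟩ := pvInit_spec grid
  have hvalid : ∀ i ∈ List.range grid.length, ∀ j ∈ List.range grid.length,
      pvValidC grid.length ((i : Int), (j : Int)) := by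
    intro i hi j hj
    simp only [List.mem_range] at hi hj
    exact ⟨by simp, by simp; omega, by simp, by simp; omega⟩
  by_cases hL : pvLandCells grid = []
  · -- no land at all: A's queue starts empty, every cell keeps distance inf
    have hval0 : ∀ i ∈ List.range grid.length, ∀ j ∈ List.range grid.length,
        pvGridVal grid i j = 0 := by
      intro i hi j hj
      by_contra hv
      have hmem : ((i : Int), (j : Int)) ∈ pvLandCells grid :=
        mem_landCells.mpr ⟨hvalid i hi j hj, by simpa using hv⟩
      rw [hL] at hmem
      cases hmem
    have hfoldA : (List.range grid.length).foldl (fun ans i =>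
        (List.range grid.length).foldl (fun ans j =>
          if pvGridVal grid i j = 0 then
            max ans (pvGet2 (pvInit grid grid.length).1 (i : Int) (j : Int))
          else ans) ans) (-1 : Int) =
        if grid.length = 0 then -1 else pvInf grid.length := by
      have hstep : (List.range grid.length).foldl (fun ans i =>
          (List.range grid.length).foldl (fun ans j =>
            if pvGridVal grid i j = 0 then
              max ans (pvGet2 (pvInit grid grid.length).1 (i : Int) (j : Int))
            else ans) ans) (-1 : Int) =
          (List.range grid.length).foldl (fun ans _ =>
            (List.range grid.length).foldl (fun ans _ =>
              max ans (pvInf grid.length)) ans) (-1 : Int) := by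
        apply List.foldl_ext
        intro acc i hi
        apply List.foldl_ext
        intro acc2 j hj
        rw [if_pos (hval0 i hi j hj)]
        congr 1
        rw [s4 _ (hvalid i hi j hj), if_neg]
        simp [hval0 i hi j hj]
      rw [hstep]
      rcases Nat.eq_zero_or_pos grid.length with hn0 | hn0
      · rw [hn0]
        simp
      · rw [if_neg (by omega)]
        have hinner : ∀ acc : Int, (List.range grid.length).foldl (fun ans _ =>
            max ans (pvInf grid.length)) acc = max acc (pvInf grid.length) := by
          intro acc
          rw [pvFoldl_const_max, if_neg (by simp only [List.isEmpty_iff, List.range_eq_nil]; omega)]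
        rw [List.foldl_ext _ (fun (ans : Int) (_ : Nat) => max ans (pvInf grid.length)) _
          (fun acc x _ => hinner acc)]
        rw [pvFoldl_const_max, if_neg (by simp only [List.isEmpty_iff, List.range_eq_nil]; omega)]
        rw [max_eq_right]
        have : (0 : Int) ≤ pvInf grid.length := by
          simp only [pvInf]
          positivity
        omega
    unfold maxDistance4 maxDistance4_alt
    dsimp only
    rw [s3, hL, pvBfs]
    rw [if_pos (show ([] : List (Int × Int)).isEmpty = true by rfl)]
    rw [hfoldA]
    rcases Nat.eq_zero_or_pos grid.length with hn0 | hn0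
    · rw [if_pos hn0]
      split <;> rfl
    · rw [if_neg (by omega)]
  · -- there is land: the BFS computes the Manhattan distance transform
    have hn1 : 1 ≤ grid.length := by
      obtain ⟨l, hl⟩ := List.exists_mem_of_ne_nil _ hL
      obtain ⟨⟨a1, a2, a3, a4⟩, _⟩ := mem_landCells.mp hl
      omega
    have hInv0 : PvInv grid (pvInit grid grid.length).1 (pvInit grid grid.length).2.1
        (pvLandCells grid) := by
      refine ⟨s1, s2, ?_, ?_, nodup_landCells grid, ?_, ?_, ?_, ?_⟩
      · intro c hc hcb
        have hval := (s5 c hc).mp hcb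
        rw [s4 c hc, if_pos hval]
        exact (pvD_land hL (mem_landCells.mpr ⟨hc, hval⟩)).symm
      · intro c hc hcb
        have hval : ¬ pvGridVal grid c.1.toNat c.2.toNat ≠ 0 := by
          intro h
          rw [(s5 c hc).mpr h] at hcb
          cases hcb
        rw [s4 c hc, if_neg hval]
      · intro c hcl
        have h := mem_landCells.mp hcl
        exact ⟨h.1, (s5 c h.1).mpr h.2⟩
      · intro l hl
        have h := mem_landCells.mp hl
        exact (s5 l h.1).mpr h.2
      · intro c hc hcb hcq
        exact absurd (mem_landCells.mpr ⟨hc, (s5 c hc).mp hcb⟩) hcq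
      · refine Or.inr ⟨0, pvLandCells grid, [], by simp, hL, fun c hcl => pvD_land hL hcl,
          by simp, fun c hcv hlt => absurd hlt ?_⟩
        have := pvD_nonneg hL c
        omega
    have hdF := pvBfs_correct hL _ _ _ hInv0
    have hfold_eq : (List.range grid.length).foldl (fun ans i =>
        (List.range grid.length).foldl (fun ans j =>
          if pvGridVal grid i j = 0 then
            max ans (pvGet2 (pvBfs grid.length (pvInit grid grid.length).1
              (pvInit grid grid.length).2.1 (pvLandCells grid)) (i : Int) (j : Int))
          else ans) ans) (-1 : Int) =
        (List.range grid.length).foldl (fun best i =>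
          (List.range grid.length).foldl (fun best j =>
            if pvGridVal grid i j = 0 then
              max best ((PySem.List.min? ((pvLandCells grid).map
                (fun l => (pvMd ((i : Int), (j : Int)) l : Int))) (fun v => v)).getD 0)
            else best) best) (-1 : Int) := by
      apply List.foldl_ext
      intro acc i hi
      apply List.foldl_ext
      intro acc2 j hj
      by_cases hval : pvGridVal grid i j = 0
      · rw [if_pos hval, if_pos hval]
        congr 1
        exact hdF ((i : Int), (j : Int)) (hvalid i hi j hj)
      · rw [if_neg hval, if_neg hval]
    have hlt : (List.range grid.length).foldl (fun ans i =>
        (List.range grid.length).foldl (fun ans j =>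
          if pvGridVal grid i j = 0 then
            max ans (pvGet2 (pvBfs grid.length (pvInit grid grid.length).1
              (pvInit grid grid.length).2.1 (pvLandCells grid)) (i : Int) (j : Int))
          else ans) ans) (-1 : Int) < pvInf grid.length := by
      have hstart : (-1 : Int) < pvInf grid.length := by
        have : (0 : Int) < pvInf grid.length := by
          simp only [pvInf]
          positivity
        omega
      refine pvFoldl_pred (fun a => a < pvInf grid.length) _ _ _ hstart ?_
      intro acc i hi hacc
      refine pvFoldl_pred (fun a => a < pvInf grid.length) _ _ _ hacc ?_
      intro acc2 j hj hacc2
      split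
      · rw [hdF ((i : Int), (j : Int)) (hvalid i hi j hj)]
        have h1 := pvD_bound hL (hvalid i hi j hj)
        have h2 : (2 : Int) * grid.length - 2 + 1 < 2 * ((grid.length : Int) * grid.length) := by
          have : 1 ≤ (grid.length : Int) := by exact_mod_cast hn1
          nlinarith
        rw [pvInf] at hacc2 ⊢
        simp only [max_lt_iff]
        exact ⟨hacc2, by omega⟩
      · exact hacc2
    unfold maxDistance4 maxDistance4_alt
    dsimp only
    rw [s3]
    rw [if_neg (show ¬ (pvLandCells grid).isEmpty = true by simp [hL])]
    rw [hfold_eq] at hlt ⊢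
    rw [if_pos (ne_of_lt hlt)]

-- ===== VERDICT (by name: the statement is the Claim_ definition above) =====
theorem maxDistance4_spec : Claim_equal_maxDistance4 := by
  intro grid _ _
  exact maxDistance4_main grid
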